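-- pv_equiv track=rewrite | github.com/khanhung2104/Boosting-classification-of-bounding-boxes | gen_features.py | get_xy_coordinate_in_a_single_box
-- ===== SOURCE A (Python) =====
-- def get_xy_coordinate_in_a_single_box(X_cl):
--     """
--     Get x coordinates and y coordinates and distinguish from each file
--     """
--     x = []
--     y = []
--     for i in range(0, len(X_cl)):
--         x.append(X_cl[i][0])
--         x.append(X_cl[i][2])
--         y.append(X_cl[i][1])
--         y.append(X_cl[i][3])
--     c = 2
--     fi_x= lambda x, c: [tuple(x[i:i+c]) for i in range(0, len(x), c)]
--     fi_y= lambda y, c: [tuple(y[i:i+c]) for i in range(0, len(y), c)]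
--     x = fi_y(x,c)
--     y = fi_y(y,c)
--     return x,y
-- ===== SOURCE B (Python) =====
-- def get_xy_coordinate_in_a_single_box(X_cl):
--     """
--     Get x coordinates and y coordinates and distinguish from each file
--     """
--     x = [(b[0], b[2]) for b in X_cl]
--     y = [(b[1], b[3]) for b in X_cl]
--     return x, y
-- ===== Notes on version B (the rewrite author's own statement) =====
-- stated objective: simpler
-- what changed: B builds the per-box (x1,x2) and (y1,y2) pairs directly in one comprehension per output, eliminating A's flatten-into-a-single-list pass and the second slice-and-rechunk pass over an intermediate flat list.
import Mathlib
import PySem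

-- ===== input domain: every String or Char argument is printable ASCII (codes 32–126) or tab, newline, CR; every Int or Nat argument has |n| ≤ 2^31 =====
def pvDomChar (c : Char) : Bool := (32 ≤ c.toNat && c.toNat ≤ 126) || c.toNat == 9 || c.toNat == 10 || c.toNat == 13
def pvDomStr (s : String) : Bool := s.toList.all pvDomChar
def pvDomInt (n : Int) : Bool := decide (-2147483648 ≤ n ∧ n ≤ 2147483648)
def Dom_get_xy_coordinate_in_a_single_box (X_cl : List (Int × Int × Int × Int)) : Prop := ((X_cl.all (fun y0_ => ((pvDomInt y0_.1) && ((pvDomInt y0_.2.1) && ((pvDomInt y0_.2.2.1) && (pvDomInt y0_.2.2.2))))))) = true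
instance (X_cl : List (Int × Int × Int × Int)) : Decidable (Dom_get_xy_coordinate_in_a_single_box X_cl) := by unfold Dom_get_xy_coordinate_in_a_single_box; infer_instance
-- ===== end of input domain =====

-- B builds the per-box (x1,x2)/(y1,y2) pairs in one comprehension each, skipping A's
-- flatten-then-rechunk passes; proved to return the same value on every input.


-- ===== PORT A =====
-- tuple(l) for a slice l: in A, every slice x[i:i+2] has exactly 2 elements (the flat
-- list has even length), so building the pair from positions 0 and 1 is exact here.
def pvTuple2 (l : List Int) : Int × Int := (l.getD 0 0, l.getD 1 0)

-- fi_y(x, c) = [tuple(x[i:i+c]) for i in range(0, len(x), c)]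
def pvFi (x : List Int) (c : Int) : List (Int × Int) :=
  (PySem.List.pyRange 0 (PySem.List.len x) c).map
    (fun i => pvTuple2 (PySem.List.slice x (some i) (some (i + c))))

def get_xy_coordinate_in_a_single_box (X_cl : List (Int × Int × Int × Int)) : (List (Int × Int)) × (List (Int × Int)) :=
  -- the loop over range(0, len(X_cl)) doing the four appends
  let xy : List Int × List Int :=
    (PySem.List.pyRange 0 (PySem.List.len X_cl)).foldl
      (fun acc i =>
        let b := PySem.List.pyGetD X_cl i (0, 0, 0, 0)
        (acc.1 ++ [b.1] ++ [b.2.2.1], acc.2 ++ [b.2.1] ++ [b.2.2.2]))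
      ([], [])
  let c : Int := 2
  let x := pvFi xy.1 c
  let y := pvFi xy.2 c
  (x, y)

-- ===== PORT B =====
def get_xy_coordinate_in_a_single_box_alt (X_cl : List (Int × Int × Int × Int)) : (List (Int × Int)) × (List (Int × Int)) :=
  (X_cl.map (fun b => (b.1, b.2.2.1)), X_cl.map (fun b => (b.2.1, b.2.2.2)))

-- ===== PRECONDITION & SPEC =====
def Spec_get_xy_coordinate_in_a_single_box (X_cl : List (Int × Int × Int × Int)) (out : (List (Int × Int)) × (List (Int × Int))) : Prop := out = get_xy_coordinate_in_a_single_box_alt X_cl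
instance (X_cl : List (Int × Int × Int × Int)) (out : (List (Int × Int)) × (List (Int × Int))) : Decidable (Spec_get_xy_coordinate_in_a_single_box X_cl out) := by unfold Spec_get_xy_coordinate_in_a_single_box; infer_instance

-- ===== CLAIM (what is proved, stated in full; the proofs are below) =====
def Claim_equal_get_xy_coordinate_in_a_single_box : Prop := ∀ (X_cl : List (Int × Int × Int × Int)), Dom_get_xy_coordinate_in_a_single_box X_cl → Spec_get_xy_coordinate_in_a_single_box X_cl (get_xy_coordinate_in_a_single_box X_cl)

-- ===== LEMMAS AND PROOFS =====

-- dropping 2*k elements of a flatMap of 2-element blocks drops k blocks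
theorem pvDrop_flatMap_two {α : Type} (f g : α → Int) (l : List α) (k : Nat) :
    (l.flatMap (fun b => [f b, g b])).drop (2 * k) = (l.drop k).flatMap (fun b => [f b, g b]) := by
  induction k generalizing l with
  | zero => simp
  | succ k ih =>
    cases l with
    | nil => simp
    | cons b t =>
      have h2 : 2 * (k + 1) = (2 * k) + 1 + 1 := by omega
      simp [List.flatMap_cons, h2, List.drop_succ_cons, ih]

-- A's rechunk applied to the flat list recovers exactly B's per-box pairs
theorem pvFi_flatMap {α : Type} (f g : α → Int) (l : List α) :
    pvFi (l.flatMap (fun b => [f b, g b])) 2 = l.map (fun b => (f b, g b)) := by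
  have hlen : (l.flatMap (fun b => [f b, g b])).length = 2 * l.length := by
    induction l with
    | nil => simp
    | cons b t ih => simp [List.flatMap_cons, ih]; omega
  unfold pvFi
  rw [PySem.List.len_eq, hlen]
  push_cast
  rw [PySem.List.pyRange_of_pos 0 (2 * (l.length : Int)) (by norm_num)]
  cases hl : l.length with
  | zero =>
    have : l = [] := List.length_eq_zero_iff.mp hl
    subst this; simp
  | succ m =>
    have hcount : (if (0:Int) < 2 * ((m:Int) + 1) then ((2 * ((m:Int)+1) - 0 + 2 - 1) / 2).toNat else 0) = m + 1 := by
      rw [if_pos (by positivity)]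
      have : (2 * ((m:Int)+1) - 0 + 2 - 1) / 2 = (m:Int) + 1 := by omega
      rw [this]; omega
    push_cast
    rw [hcount]
    rw [← hl, List.map_map]
    apply List.ext_getElem (by simp)
    intro k hk hk'
    simp only [List.getElem_map, List.getElem_range, Function.comp_apply]
    have hsl : PySem.List.slice (l.flatMap (fun b => [f b, g b])) (some (0 + 2 * (k:Int)))
        (some (0 + 2 * (k:Int) + 2)) = [f (l[k]'(by simpa using hk')), g (l[k]'(by simpa using hk'))] := by
      have e1 : (0 + 2 * (k:Int)) = ((2 * k : Nat) : Int) := by push_cast; ring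
      have e2 : (0 + 2 * (k:Int) + 2) = ((2 * k + 2 : Nat) : Int) := by push_cast; ring
      rw [e2, e1, PySem.List.slice_natCast, show 2 * k + 2 - 2 * k = 2 from by omega,
          pvDrop_flatMap_two]
      have hk'' : k < l.length := by simpa using hk'
      have : l.drop k = l[k] :: l.drop (k + 1) := List.drop_eq_getElem_cons hk''
      rw [this]
      simp only [List.flatMap_cons, List.cons_append]
      rfl
    rw [hsl]
    simp [pvTuple2]

-- the index loop over range(len) is a fold over the list, and the pair-fold splits
theorem pvLoop_eq_flatMap (X_cl : List (Int × Int × Int × Int)) :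
    (PySem.List.pyRange 0 (PySem.List.len X_cl)).foldl
      (fun (acc : List Int × List Int) i =>
        let b := PySem.List.pyGetD X_cl i (0, 0, 0, 0)
        (acc.1 ++ [b.1] ++ [b.2.2.1], acc.2 ++ [b.2.1] ++ [b.2.2.2]))
      ([], [])
    = (X_cl.flatMap (fun b => [b.1, b.2.2.1]), X_cl.flatMap (fun b => [b.2.1, b.2.2.2])) := by
  rw [PySem.List.foldl_pyRange_zero_pyGetD X_cl (0,0,0,0)
    (fun (acc : List Int × List Int) b =>
      (acc.1 ++ [b.1] ++ [b.2.2.1], acc.2 ++ [b.2.1] ++ [b.2.2.2])) ([], [])]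
  induction X_cl using List.reverseRecOn with
  | nil => simp
  | append_singleton t b ih => rw [List.foldl_append, ih]; simp

-- ===== VERDICT (by name: the statement is the Claim_ definition above) =====
theorem get_xy_coordinate_in_a_single_box_spec : Claim_equal_get_xy_coordinate_in_a_single_box := by
  intro X_cl _
  unfold Spec_get_xy_coordinate_in_a_single_box
  unfold get_xy_coordinate_in_a_single_box get_xy_coordinate_in_a_single_box_alt
  simp only [pvLoop_eq_flatMap]
  rw [pvFi_flatMap (fun b => b.1) (fun b => b.2.2.1) X_cl,
      pvFi_flatMap (fun b => b.2.1) (fun b => b.2.2.2) X_cl]
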